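-- pv_equiv track=rewrite | github.com/sanjelarun/ParallelPy | examples/nested_loop_1.py | alter_values
-- ===== SOURCE A (Python) =====
-- def alter_values(data_1, data_2):
--     cnt = 0
--     data_3 = [0] * len(data_1)
--     for i in data_1:
--         for j in data_2:
--             data_3[cnt] += (i + j)
--         cnt += 1
--     return data_3
-- ===== SOURCE B (Python) =====
-- def alter_values(data_1, data_2):
--     s = sum(data_2)
--     m = len(data_2)
--     return [m * i + s for i in data_1]
-- ===== Notes on version B (the rewrite author's own statement) =====
-- stated objective: faster
-- what changed: Replaces the nested loop with a closed form: precompute sum(data_2) and len(data_2) once, then each output is len*i+sum, removing the inner scan.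
import Mathlib
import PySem

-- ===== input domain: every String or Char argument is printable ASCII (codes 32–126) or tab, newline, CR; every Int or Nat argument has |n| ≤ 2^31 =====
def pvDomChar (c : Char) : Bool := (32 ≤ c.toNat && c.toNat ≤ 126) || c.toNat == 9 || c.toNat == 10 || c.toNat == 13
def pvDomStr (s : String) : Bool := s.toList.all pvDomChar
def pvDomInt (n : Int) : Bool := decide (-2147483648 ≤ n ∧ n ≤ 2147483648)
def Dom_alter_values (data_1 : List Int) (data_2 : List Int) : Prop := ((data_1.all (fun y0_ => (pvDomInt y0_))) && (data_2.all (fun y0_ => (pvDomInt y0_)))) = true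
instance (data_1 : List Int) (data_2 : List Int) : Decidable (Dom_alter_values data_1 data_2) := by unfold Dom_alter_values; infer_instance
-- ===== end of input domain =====

-- B replaces the O(n*m) nested loop by the closed form len(data_2)*i + sum(data_2) per element (asymptotically faster).


-- ===== PORT A =====
-- data_3[cnt] += (i+j): cnt is always in range (data_3 has len(data_1) slots), so getD/set is exact here
def alter_values (data_1 : List Int) (data_2 : List Int) : List Int :=
  let data_3 := List.replicate data_1.length (0 : Int)
  let res := data_1.foldl
    (fun (st : Nat × List Int) i =>
      (st.1 + 1,
       data_2.foldl (fun d3 j => d3.set st.1 (d3.getD st.1 0 + (i + j))) st.2))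
    (0, data_3)
  res.2

-- ===== PORT B =====
def alter_values_alt (data_1 : List Int) (data_2 : List Int) : List Int :=
  let s := data_2.sum
  let m := (data_2.length : Int)
  data_1.map (fun i => m * i + s)

-- ===== PRECONDITION & SPEC =====
def Spec_alter_values (data_1 : List Int) (data_2 : List Int) (out : List Int) : Prop := out = alter_values_alt data_1 data_2
instance (data_1 : List Int) (data_2 : List Int) (out : List Int) : Decidable (Spec_alter_values data_1 data_2 out) := by unfold Spec_alter_values; infer_instance

-- ===== CLAIM (what is proved, stated in full; the proofs are below) =====
def Claim_equal_alter_values : Prop := ∀ (data_1 : List Int) (data_2 : List Int), Dom_alter_values data_1 data_2 → Spec_alter_values data_1 data_2 (alter_values data_1 data_2)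

-- ===== LEMMAS AND PROOFS =====

-- ===== VERDICT (by name: the statement is the Claim_ definition above) =====
-- inner loop: repeatedly adding (i+j) into slot cnt accumulates m*i + sum
theorem inner_loop (data_2 : List Int) (i : Int) (cnt : Nat) (d3 : List Int)
    (h : cnt < d3.length) (a : Int) :
    data_2.foldl (fun d3 j => d3.set cnt (d3.getD cnt 0 + (i + j))) (d3.set cnt a)
      = d3.set cnt (a + ((data_2.length : Int) * i + data_2.sum)) := by
  induction data_2 generalizing a with
  | nil => simp
  | cons j t ih =>
      simp only [List.foldl_cons]
      rw [List.getD_eq_getElem?_getD, List.getElem?_set_self (by omega), Option.getD_some,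
        List.set_set, ih]
      simp only [List.length_cons, List.sum_cons]
      congr 1
      push_cast
      ring

theorem outer_loop (rest : List Int) (data_2 : List Int) (pre tail : List Int)
    (htail : tail = List.replicate rest.length (0 : Int)) :
    (rest.foldl
      (fun (st : Nat × List Int) i =>
        (st.1 + 1,
         data_2.foldl (fun d3 j => d3.set st.1 (d3.getD st.1 0 + (i + j))) st.2))
      (pre.length, pre ++ tail)).2
    = pre ++ rest.map (fun i => (data_2.length : Int) * i + data_2.sum) := by
  induction rest generalizing pre tail with
  | nil => simp [htail]
  | cons i t ih =>
      subst htail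
      simp only [List.foldl_cons, List.length_cons, List.replicate_succ]
      have hset : (pre ++ (0 : Int) :: List.replicate t.length 0)
          = (pre ++ (0 : Int) :: List.replicate t.length 0).set pre.length 0 := by
        rw [List.set_append_right _ _ (le_refl _)]
        simp
      rw [hset, inner_loop _ _ _ _ (by simp)]
      rw [List.set_append_right _ _ (le_refl _)]
      simp only [Nat.sub_self, List.set_cons_zero, zero_add]
      have : pre ++ ((data_2.length : Int) * i + data_2.sum) :: List.replicate t.length 0
          = (pre ++ [(data_2.length : Int) * i + data_2.sum]) ++ List.replicate t.length 0 := by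
        simp
      rw [this]
      have hlen : pre.length + 1 = (pre ++ [(data_2.length : Int) * i + data_2.sum]).length := by
        simp
      rw [hlen, ih _ _ rfl]
      simp

-- ===== VERDICT (by name: the statement is the Claim_ definition above) =====
theorem alter_values_spec : Claim_equal_alter_values := by
  intro data_1 data_2 _
  unfold Spec_alter_values alter_values alter_values_alt
  have := outer_loop data_1 data_2 [] (List.replicate data_1.length 0) rfl
  simpa using this
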